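-- pv_equiv track=rewrite | github.com/RookieZW/LinkCode | 1323取物资/取物资.py | Fetchsupplies
-- ===== SOURCE A (Python) =====
-- def Fetchsupplies(coordinates):
--     # write your code here
--     coordinate = [x[0] for x in coordinates]
--     coordinate.sort()
--     middle = len(coordinate) // 2
--     middle_value = coordinate[middle]
--     count = 0
--     for i in coordinate:
--         count += abs(i -middle_value)
--     return count
-- ===== SOURCE B (Python) =====
-- def Fetchsupplies(coordinates):
--     # Pair the sorted x-coordinates from both ends: the total distance to the
--     # median equals the sum of (largest - smallest) over the n//2 outer pairs,
--     # so the median itself is never extracted and abs() is never needed.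
--     xs = sorted(x[0] for x in coordinates)
--     n = len(xs)
--     total = 0
--     for i in range(n // 2):
--         total += xs[n - 1 - i] - xs[i]
--     return total
-- ===== Notes on version B (the rewrite author's own statement) =====
-- stated objective: simpler
-- what changed: Instead of extracting the median element and summing absolute distances over all n points, B sums (largest - smallest) over the n//2 outer pairs of the sorted list, needing no median lookup and no abs.
import Mathlib
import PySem

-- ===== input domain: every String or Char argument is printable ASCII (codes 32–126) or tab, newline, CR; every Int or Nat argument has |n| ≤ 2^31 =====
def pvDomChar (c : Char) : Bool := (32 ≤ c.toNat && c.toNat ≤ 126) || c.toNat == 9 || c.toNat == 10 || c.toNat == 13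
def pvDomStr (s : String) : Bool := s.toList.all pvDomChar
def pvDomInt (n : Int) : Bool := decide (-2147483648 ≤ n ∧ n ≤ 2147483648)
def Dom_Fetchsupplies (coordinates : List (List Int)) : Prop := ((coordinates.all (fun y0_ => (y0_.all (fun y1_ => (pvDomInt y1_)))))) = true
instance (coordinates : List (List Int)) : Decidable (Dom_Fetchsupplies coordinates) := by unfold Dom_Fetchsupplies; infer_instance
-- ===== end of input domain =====

-- B changes the algorithm's second phase: it sums (largest - smallest) over the
-- n//2 outer pairs of the sorted list instead of summing |x - median| over all
-- points; the return value is proved identical on Pre_.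

-- ===== PORT A =====
def Fetchsupplies (coordinates : List (List Int)) : Int :=
  -- coordinate = [x[0] for x in coordinates]  (x[0] raises on an empty row: excluded by Pre_)
  let coordinate := coordinates.map (fun x => PySem.List.pyGetD x 0 0)
  -- coordinate.sort()
  let coordinate := PySem.List.sorted coordinate (fun v => v) false
  -- middle = len(coordinate) // 2
  let middle : Int := PySem.Int.floordiv (coordinate.length : Int) 2
  -- middle_value = coordinate[middle]  (raises on the empty list: excluded by Pre_)
  let middle_value : Int := PySem.List.pyGetD coordinate middle 0
  -- for i in coordinate: count += abs(i - middle_value)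
  coordinate.foldl (fun count i => count + |i - middle_value|) 0

-- ===== PORT B =====
def Fetchsupplies_alt (coordinates : List (List Int)) : Int :=
  -- xs = sorted(x[0] for x in coordinates)
  let xs := PySem.List.sorted (coordinates.map (fun x => PySem.List.pyGetD x 0 0)) (fun v => v) false
  -- n = len(xs)
  let n : Int := (xs.length : Int)
  -- for i in range(n // 2): total += xs[n - 1 - i] - xs[i]
  (PySem.List.pyRange 0 (PySem.Int.floordiv n 2) 1).foldl
    (fun total i => total + (PySem.List.pyGetD xs (n - 1 - i) 0 - PySem.List.pyGetD xs i 0)) 0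

-- ===== PRECONDITION & SPEC =====
-- Pre_ excludes exactly the inputs on which A raises IndexError: an empty
-- coordinates list (coordinate[middle] fails) and a list containing an empty row
-- (x[0] fails).
def Pre_Fetchsupplies (coordinates : List (List Int)) : Prop :=
  coordinates ≠ [] ∧ ∀ r ∈ coordinates, r ≠ []
instance (coordinates : List (List Int)) : Decidable (Pre_Fetchsupplies coordinates) := by
  unfold Pre_Fetchsupplies; infer_instance
def pvWitness_Fetchsupplies : List (List Int) := [[3, 1], [-1], [7, 0]]

def Spec_Fetchsupplies (coordinates : List (List Int)) (out : Int) : Prop := out = Fetchsupplies_alt coordinates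
instance (coordinates : List (List Int)) (out : Int) : Decidable (Spec_Fetchsupplies coordinates out) := by unfold Spec_Fetchsupplies; infer_instance

-- ===== CLAIM (what is proved, stated in full; the proofs are below) =====
def Claim_equal_Fetchsupplies : Prop := ∀ (coordinates : List (List Int)), Dom_Fetchsupplies coordinates → Pre_Fetchsupplies coordinates → Spec_Fetchsupplies coordinates (Fetchsupplies coordinates)

-- ===== LEMMAS AND PROOFS =====


theorem pv_getD_mono (s : List Int) (hs : s.Pairwise (· ≤ ·)) (i j : Nat)
    (hij : i ≤ j) (hj : j < s.length) : s.getD i 0 ≤ s.getD j 0 := by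
  rcases Nat.eq_or_lt_of_le hij with h | h
  · subst h; exact le_refl _
  · rw [List.getD_eq_getElem s 0 (Nat.lt_of_le_of_lt hij hj), List.getD_eq_getElem s 0 hj]
    exact (List.pairwise_iff_getElem.mp hs) i j _ hj h

theorem pv_core (s : List Int) (hs : s.Pairwise (· ≤ ·)) (hn : s ≠ []) :
    ∑ i ∈ Finset.range s.length, |s.getD i 0 - s.getD (s.length / 2) 0|
      = ∑ i ∈ Finset.range (s.length / 2), (s.getD (s.length - 1 - i) 0 - s.getD i 0) := by
  set n := s.length with hnn
  have hpos : 0 < n := List.length_pos_iff.mpr hn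
  set c := s.getD (n / 2) 0 with hc
  have hmono := pv_getD_mono s hs
  have hsplit : ∑ i ∈ Finset.range n, |s.getD i 0 - c|
      = ∑ i ∈ Finset.range (n/2), |s.getD i 0 - c| + ∑ i ∈ Finset.Ico (n/2) n, |s.getD i 0 - c| := by
    rw [Finset.range_eq_Ico, ← Finset.sum_Ico_consecutive _ (Nat.zero_le _) (Nat.div_le_self n 2)]
  have hlow : ∀ i ∈ Finset.range (n/2), |s.getD i 0 - c| = c - s.getD i 0 := by
    intro i hi; rw [Finset.mem_range] at hi
    have h1 : s.getD i 0 ≤ c := hmono i (n/2) (le_of_lt hi) (by omega)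
    rw [abs_of_nonpos (by omega)]; ring
  have hIco : ∑ i ∈ Finset.Ico (n/2) n, |s.getD i 0 - c|
      = ∑ i ∈ Finset.range (n - n/2), (s.getD (n - 1 - i) 0 - c) := by
    rw [Finset.sum_Ico_eq_sum_range, ← Finset.sum_range_reflect]
    apply Finset.sum_congr rfl
    intro i hi; rw [Finset.mem_range] at hi
    have h1 : n/2 + (n - n/2 - 1 - i) = n - 1 - i := by omega
    rw [h1]
    have h2 : c ≤ s.getD (n-1-i) 0 := hmono (n/2) (n-1-i) (by omega) (by omega)
    rw [abs_of_nonneg (by omega)]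
  have hupper : ∑ i ∈ Finset.range (n - n/2), (s.getD (n-1-i) 0 - c)
      = ∑ i ∈ Finset.range (n/2), (s.getD (n-1-i) 0 - c) := by
    rcases Nat.even_or_odd n with he | ho
    · have h0 := Nat.even_iff.mp he
      have h2 : n - n/2 = n/2 := by omega
      rw [h2]
    · have h0 := Nat.odd_iff.mp ho
      have h2 : n - n/2 = n/2 + 1 := by omega
      rw [h2, Finset.sum_range_succ]
      have h3 : n - 1 - n/2 = n/2 := by omega
      rw [h3, ← hc, sub_self, add_zero]
  rw [hsplit, Finset.sum_congr rfl hlow, hIco, hupper, ← Finset.sum_add_distrib]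
  apply Finset.sum_congr rfl
  intro i _; ring

theorem pv_map_eq (s : List Int) (g : Int → Int) :
    s.map g = (List.range s.length).map (fun i => g (s.getD i 0)) := by
  apply List.ext_getElem
  · simp
  · intro i h1 h2
    simp at h2
    simp only [List.getElem_map, List.getElem_range]
    rw [List.getD_eq_getElem s 0 h2]

theorem pv_sum_range (n : Nat) (h : Nat → Int) : ((List.range n).map h).sum = ∑ i ∈ Finset.range n, h i := rfl

theorem Fetchsupplies_spec : Claim_equal_Fetchsupplies := by
  intro coordinates _ hpre
  unfold Spec_Fetchsupplies Fetchsupplies Fetchsupplies_alt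
  dsimp only
  set s := PySem.List.sorted (coordinates.map fun x => PySem.List.pyGetD x 0 0) (fun v => v) false with hsdef
  have hs : s.Pairwise (· ≤ ·) := PySem.List.sorted_pairwise _ _
  have hlen : s.length = coordinates.length := by
    rw [hsdef, PySem.List.length_sorted, List.length_map]
  have hne : s ≠ [] := by
    intro h
    apply hpre.1
    have := hlen
    rw [h] at this
    exact (List.length_eq_zero_iff.mp this.symm)
  have hpos : 0 < s.length := List.length_pos_iff.mpr hne
  have hfd : PySem.Int.floordiv ((s.length : Int)) 2 = ((s.length / 2 : Nat) : Int) := by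
    exact_mod_cast PySem.Int.floordiv_natCast s.length 2
  rw [hfd, PySem.List.pyGetD_natCast,
      PySem.List.foldl_add s (fun i => |i - s.getD (s.length / 2) 0|) 0,
      pv_map_eq, pv_sum_range, PySem.List.pyRange_one, List.foldl_map]
  have htn : (((s.length / 2 : Nat) : Int) - 0).toNat = s.length / 2 := by omega
  rw [htn,
      PySem.List.foldl_add (List.range (s.length / 2))
        (fun k => PySem.List.pyGetD s ((s.length : Int) - 1 - (0 + (k : Int))) 0
                  - PySem.List.pyGetD s (0 + (k : Int)) 0) 0,
      pv_sum_range, zero_add, zero_add, pv_core s hs hne]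
  apply Finset.sum_congr rfl
  intro k hk
  rw [Finset.mem_range] at hk
  have hc1 : (0 : Int) + (k : Int) = (k : Int) := by ring
  have hc2 : (s.length : Int) - 1 - (k : Int) = ((s.length - 1 - k : Nat) : Int) := by omega
  rw [hc1, hc2, PySem.List.pyGetD_natCast, PySem.List.pyGetD_natCast]
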